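-- pv_equiv track=rewrite | github.com/cagianoaless/on_inductive_analysis_tfms | scripts/build_bouchard_family_datasets.py | siblings_of
-- ===== SOURCE A (Python) =====
-- def share_both_parents(
--     left: str,
--     right: str,
--     parents_by_child: dict[str, dict[str, str]],
-- ) -> bool:
--     if left == right:
--         return False
--     left_parents = parents_by_child.get(left)
--     right_parents = parents_by_child.get(right)
--     if not left_parents or not right_parents:
--         return False
--     return (
--         left_parents.get("father") == right_parents.get("father")
--         and left_parents.get("mother") == right_parents.get("mother")
--     )
--
-- def siblings_of(
--     person_id: str,
--     family_members: list[str],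
--     parents_by_child: dict[str, dict[str, str]],
-- ) -> set[str]:
--     siblings = set()
--     for candidate in family_members:
--         if share_both_parents(person_id, candidate, parents_by_child):
--             siblings.add(candidate)
--     return siblings
-- ===== SOURCE B (Python) =====
-- def siblings_of(person_id, family_members, parents_by_child):
--     person_parents = parents_by_child.get(person_id)
--     if not person_parents:
--         return set()
--     keyed = [((p.get("father"), p.get("mother")), member)
--              for member in family_members
--              for p in [parents_by_child.get(member)]
--              if p]
--     groups = {}
--     for key, member in keyed:
--         groups.setdefault(key, []).append(member)
--     bucket = groups.get((person_parents.get("father"), person_parents.get("mother")), [])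
--     return {m for m in bucket if m != person_id}
-- ===== Notes on version B (the rewrite author's own statement) =====
-- stated objective: alternative
-- what changed: Replaces the per-candidate share_both_parents comparison loop with a single pass that groups members by their (father, mother) key into a dict and returns the person's bucket minus person_id.
import Mathlib
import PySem

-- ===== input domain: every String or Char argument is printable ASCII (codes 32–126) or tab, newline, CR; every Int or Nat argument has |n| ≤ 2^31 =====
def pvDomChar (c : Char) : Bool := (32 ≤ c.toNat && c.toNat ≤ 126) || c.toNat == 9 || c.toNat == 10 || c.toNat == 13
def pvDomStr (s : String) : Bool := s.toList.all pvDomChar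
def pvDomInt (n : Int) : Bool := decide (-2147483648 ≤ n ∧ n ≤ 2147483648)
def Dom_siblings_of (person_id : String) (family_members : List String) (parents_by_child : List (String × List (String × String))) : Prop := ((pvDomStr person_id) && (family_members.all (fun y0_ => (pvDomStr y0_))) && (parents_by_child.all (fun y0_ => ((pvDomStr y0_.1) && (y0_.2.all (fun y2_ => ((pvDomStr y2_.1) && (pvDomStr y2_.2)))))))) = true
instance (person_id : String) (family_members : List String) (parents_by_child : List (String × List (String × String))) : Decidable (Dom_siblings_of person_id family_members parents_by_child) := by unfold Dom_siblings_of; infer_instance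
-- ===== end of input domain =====

-- B replaces the per-candidate parent comparison with a one-pass grouping index by (father, mother) key; alternative decomposition, same cost.


-- ===== PORT A =====
-- dict.get on the outer dict (child -> parents dict) and the inner dict (role -> name)
def pvOuterGet? (d : List (String × List (String × String))) (k : String) : Option (List (String × String)) :=
  (PySem.Dict.mk d).get? k

def pvInnerGet? (d : List (String × String)) (k : String) : Option String :=
  (PySem.Dict.mk d).get? k

def share_both_parents (left : String) (right : String) (parents_by_child : List (String × List (String × String))) : Bool :=
  if left = right then false
  else
    match pvOuterGet? parents_by_child left, pvOuterGet? parents_by_child right with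
    | some lp, some rp =>
        -- 'not left_parents or not right_parents': an empty dict is falsy
        if lp = [] ∨ rp = [] then false
        else (pvInnerGet? lp "father" == pvInnerGet? rp "father")
          && (pvInnerGet? lp "mother" == pvInnerGet? rp "mother")
    | _, _ => false

def siblings_of (person_id : String) (family_members : List String) (parents_by_child : List (String × List (String × String))) : List String :=
  family_members.foldl
    (fun (siblings : PySem.Set String) candidate =>
      if share_both_parents person_id candidate parents_by_child then PySem.Set.add siblings candidate
      else siblings)
    PySem.Set.empty

-- ===== PORT B =====
-- parent-pair key of one member, none if the member's parents entry is falsy (missing or empty)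
def pvKeyOf? (parents_by_child : List (String × List (String × String))) (m : String) : Option ((Option String × Option String) × String) :=
  match pvOuterGet? parents_by_child m with
  | none => none
  | some p => if p = [] then none else some ((pvInnerGet? p "father", pvInnerGet? p "mother"), m)

def siblings_of_alt (person_id : String) (family_members : List String) (parents_by_child : List (String × List (String × String))) : List String :=
  match pvOuterGet? parents_by_child person_id with
  | none => []
  | some pp =>
    if pp = [] then []
    else
      let keyed := family_members.filterMap (pvKeyOf? parents_by_child)
      let groups := keyed.foldl
        (fun (d : PySem.Dict (Option String × Option String) (List String)) pr =>
          d.modify pr.1 [] (· ++ [pr.2]))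
        PySem.Dict.empty
      let bucket := groups.getD (pvInnerGet? pp "father", pvInnerGet? pp "mother") []
      PySem.Set.ofList (bucket.filter (fun m => m ≠ person_id))

-- ===== PRECONDITION & SPEC =====
def Spec_siblings_of (person_id : String) (family_members : List String) (parents_by_child : List (String × List (String × String))) (out : List String) : Prop := out = siblings_of_alt person_id family_members parents_by_child
instance (person_id : String) (family_members : List String) (parents_by_child : List (String × List (String × String))) (out : List String) : Decidable (Spec_siblings_of person_id family_members parents_by_child out) := by unfold Spec_siblings_of; infer_instance

-- ===== CLAIM (what is proved, stated in full; the proofs are below) =====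
def Claim_equal_siblings_of : Prop := ∀ (person_id : String) (family_members : List String) (parents_by_child : List (String × List (String × String))), Dom_siblings_of person_id family_members parents_by_child → Spec_siblings_of person_id family_members parents_by_child (siblings_of person_id family_members parents_by_child)

-- ===== LEMMAS AND PROOFS =====

-- A's filtered Set.add loop is Set.ofList of the filtered list
theorem foldl_add_if_eq_ofList_filter (l : List String) (p : String → Bool) (s : PySem.Set String) :
    l.foldl (fun s c => if p c then PySem.Set.add s c else s) s
      = (l.filter p).foldl PySem.Set.add s := by
  induction l generalizing s with
  | nil => rfl
  | cons x xs ih =>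
    simp only [List.foldl_cons, List.filter_cons]
    by_cases h : p x = true <;> simp [h, ih]

-- ===== VERDICT (by name: the statement is the Claim_ definition above) =====
theorem siblings_of_spec : Claim_equal_siblings_of := by
  intro person_id fam pbc hd
  clear hd
  unfold Spec_siblings_of siblings_of siblings_of_alt
  rw [foldl_add_if_eq_ofList_filter]
  cases hpp : pvOuterGet? pbc person_id with
  | none =>
    have h0 : fam.filter (fun c => share_both_parents person_id c pbc) = [] := by
      apply List.filter_eq_nil_iff.mpr
      intro c _
      unfold share_both_parents
      rw [hpp]
      split
      · simp
      · cases pvOuterGet? pbc c <;> simp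
    simp [h0]
  | some pp =>
    by_cases hppe : pp = []
    · subst hppe
      have h0 : fam.filter (fun c => share_both_parents person_id c pbc) = [] := by
        apply List.filter_eq_nil_iff.mpr
        intro c _
        unfold share_both_parents
        rw [hpp]
        split
        · simp
        · cases hoc : pvOuterGet? pbc c <;> simp
      simp [h0]
    · simp only [if_neg hppe]
      rw [PySem.Dict.getD_foldl_modify_append]
      have key_eq :
          ((((fam.filterMap (pvKeyOf? pbc)).filter
              (fun pr => pr.1 == (pvInnerGet? pp "father", pvInnerGet? pp "mother"))).map (·.2)).filter (fun m => m ≠ person_id))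
          = fam.filter (fun c => share_both_parents person_id c pbc) := by
        induction fam with
        | nil => rfl
        | cons c cs ih =>
          simp only [List.filterMap_cons]
          cases hk : pvKeyOf? pbc c with
          | none =>
            have hs : share_both_parents person_id c pbc = false := by
              unfold pvKeyOf? at hk
              unfold share_both_parents
              by_cases hpc : person_id = c
              · simp [hpc]
              · rw [if_neg hpc, hpp]
                cases hoc : pvOuterGet? pbc c with
                | none => rfl
                | some cp =>
                  rw [hoc] at hk
                  simp at hk
                  simp [hk]
            simpa [hs] using ih
          | some pr =>
            obtain ⟨key, m⟩ := pr
            unfold pvKeyOf? at hk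
            cases hoc : pvOuterGet? pbc c <;> simp [hoc] at hk
            rename_i cp
            obtain ⟨hcpne, hkey, hm⟩ := hk
            subst hm
            have hs : share_both_parents person_id c pbc
                = ((key == (pvInnerGet? pp "father", pvInnerGet? pp "mother")) && (c ≠ person_id)) := by
              unfold share_both_parents
              by_cases hpc : person_id = c
              · simp [hpc]
              · have hcp' : (decide (c ≠ person_id)) = true := by simp [Ne.symm hpc]
                simp only [if_neg hpc, hpp, hoc, hcp', Bool.and_true]
                rw [if_neg (by simp [hppe, hcpne])]
                rw [← hkey]
                show (_ == _ && _ == _) = (_ && _)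
                rw [Bool.beq_comm, Bool.beq_comm (a := pvInnerGet? pp "mother")]
            by_cases hkm : key = (pvInnerGet? pp "father", pvInnerGet? pp "mother") <;>
              by_cases hcp : c = person_id <;>
              simp_all
      simp only [PySem.Dict.getD_empty, List.nil_append]
      rw [key_eq]
      exact (PySem.Set.ofList_eq_foldl _).symm
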